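-- pv_equiv track=rewrite | github.com/AbiCharles/KnowledgeGraph | pipeline/manifest_diff.py | _topology_diff
-- ===== SOURCE A (Python) =====
-- def _topology_diff(old_edges: set, new_edges: set, old_classes: set, new_classes: set) -> dict:
--     """Build the per-element status lists the visual diff renders.
--
--     Each class is tagged 'added' / 'removed' / 'common'. Each edge (object
--     property with domain + range) gets the same tag, plus the names of its
--     domain and range classes so the frontend can position arrows correctly.
--     """
--     all_classes = sorted(old_classes | new_classes)
--     nodes = []
--     for c in all_classes:
--         if c in old_classes and c in new_classes:
--             status = "common"
--         elif c in new_classes: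
--             status = "added"
--         else:
--             status = "removed"
--         nodes.append({"name": c, "status": status})
--
--     all_edges = old_edges | new_edges
--     edges = []
--     for d, p, r in sorted(all_edges):
--         if (d, p, r) in old_edges and (d, p, r) in new_edges:
--             status = "common"
--         elif (d, p, r) in new_edges:
--             status = "added"
--         else:
--             status = "removed"
--         edges.append({"domain": d, "property": p, "range": r, "status": status})
--     return {"nodes": nodes, "edges": edges}
-- ===== SOURCE B (Python) =====
-- def _topology_diff(old_edges: set, new_edges: set, old_classes: set, new_classes: set) -> dict:
--     """Set-algebra re-implementation: compute each category with &/-, build its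
--     dicts with a known constant status, then one final key-sort per output list."""
--     nodes = sorted(
--         [{"name": c, "status": "common"} for c in old_classes & new_classes]
--         + [{"name": c, "status": "added"} for c in new_classes - old_classes]
--         + [{"name": c, "status": "removed"} for c in old_classes - new_classes],
--         key=lambda n: n["name"])
--
--     def edge_dicts(es, status):
--         out = []
--         for e in es:
--             d, p, r = e
--             out.append({"domain": d, "property": p, "range": r, "status": status})
--         return out
--
--     edges = sorted(
--         edge_dicts(old_edges & new_edges, "common")
--         + edge_dicts(new_edges - old_edges, "added")
--         + edge_dicts(old_edges - new_edges, "removed"),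
--         key=lambda x: (x["domain"], x["property"], x["range"]))
--     return {"nodes": nodes, "edges": edges}
-- ===== Notes on version B (the rewrite author's own statement) =====
-- stated objective: simpler
-- what changed: Replaces the union-sort-then-branch-per-element loops by set algebra (common = &, added/removed = -) that builds each category's dicts with a constant status, concatenated and put in order by a single key-sort per output list.
import Mathlib
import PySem

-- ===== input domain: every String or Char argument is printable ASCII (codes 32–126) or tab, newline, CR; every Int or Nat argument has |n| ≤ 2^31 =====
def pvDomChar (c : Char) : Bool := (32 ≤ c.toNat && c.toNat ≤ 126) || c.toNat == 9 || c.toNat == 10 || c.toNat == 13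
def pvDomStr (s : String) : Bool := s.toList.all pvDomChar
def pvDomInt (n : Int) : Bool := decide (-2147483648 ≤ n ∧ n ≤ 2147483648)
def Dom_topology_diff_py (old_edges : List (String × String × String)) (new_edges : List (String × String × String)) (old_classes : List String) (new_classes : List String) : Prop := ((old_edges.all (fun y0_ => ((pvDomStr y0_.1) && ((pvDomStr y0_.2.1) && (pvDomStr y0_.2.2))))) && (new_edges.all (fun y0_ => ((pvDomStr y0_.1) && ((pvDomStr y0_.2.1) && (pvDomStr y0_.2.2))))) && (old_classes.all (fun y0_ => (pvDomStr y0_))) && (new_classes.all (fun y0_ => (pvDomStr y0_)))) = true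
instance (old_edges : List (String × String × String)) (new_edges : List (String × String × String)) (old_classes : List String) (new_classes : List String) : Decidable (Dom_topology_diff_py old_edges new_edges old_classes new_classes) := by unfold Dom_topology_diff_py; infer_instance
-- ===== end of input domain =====

-- B replaces the sort-union-then-branch loops by set algebra (&, -) with constant statuses and one final key-sort per list (objective: simpler); return-value equivalence only.
-- ===== PORT A =====
-- Port of A. Python tuple comparison in `sorted(all_edges)` is code-point lexicographic;
-- it is expressed exactly by the injective key e ↦ [e.1, e.2.1, e.2.2] (List lex order).
def topology_diff_py (old_edges : List (String × String × String)) (new_edges : List (String × String × String)) (old_classes : List String) (new_classes : List String) : List (String × List (List (String × String))) :=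
  let all_classes := PySem.List.sorted (PySem.Set.union old_classes new_classes) (fun c => c)
  let nodes := all_classes.foldl (fun acc c =>
    acc ++ [[("name", c), ("status",
      if PySem.Set.contains old_classes c && PySem.Set.contains new_classes c then "common"
      else if PySem.Set.contains new_classes c then "added" else "removed")]]) []
  let all_edges := PySem.Set.union old_edges new_edges
  let edges := (PySem.List.sorted all_edges (fun e => [e.1, e.2.1, e.2.2])).foldl
    (fun acc e =>
      acc ++ [[("domain", e.1), ("property", e.2.1), ("range", e.2.2), ("status",
        if PySem.Set.contains old_edges e && PySem.Set.contains new_edges e then "common"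
        else if PySem.Set.contains new_edges e then "added" else "removed")]]) []
  [("nodes", nodes), ("edges", edges)]

-- ===== PORT B =====
-- helper `edge_dicts` of Source B: a loop appending one dict per edge, with a fixed status
-- (the Python `d, p, r = e` destructuring is the triple projections e.1 / e.2.1 / e.2.2)
def pvEdgeDicts (es : List (String × String × String)) (status : String) : List (List (String × String)) :=
  es.foldl (fun out e =>
    out ++ [[("domain", e.1), ("property", e.2.1), ("range", e.2.2), ("status", status)]]) []

-- Port of B. `n["name"]` / `x["domain"]` etc. in the sort keys are ported as Dict.getD
-- with default ""; every dict B builds carries these keys, so the default is never read.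
def topology_diff_py_alt (old_edges : List (String × String × String)) (new_edges : List (String × String × String)) (old_classes : List String) (new_classes : List String) : List (String × List (List (String × String))) :=
  let nodes := PySem.List.sorted
    ((PySem.Set.inter old_classes new_classes).map (fun c => [("name", c), ("status", "common")])
      ++ (PySem.Set.diff new_classes old_classes).map (fun c => [("name", c), ("status", "added")])
      ++ (PySem.Set.diff old_classes new_classes).map (fun c => [("name", c), ("status", "removed")]))
    (fun n => PySem.Dict.getD (PySem.Dict.mk n) "name" "")
  let edges := PySem.List.sorted
    (pvEdgeDicts (PySem.Set.inter old_edges new_edges) "common"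
      ++ pvEdgeDicts (PySem.Set.diff new_edges old_edges) "added"
      ++ pvEdgeDicts (PySem.Set.diff old_edges new_edges) "removed")
    (fun x => [PySem.Dict.getD (PySem.Dict.mk x) "domain" "", PySem.Dict.getD (PySem.Dict.mk x) "property" "", PySem.Dict.getD (PySem.Dict.mk x) "range" ""])
  [("nodes", nodes), ("edges", edges)]

-- ===== PRECONDITION & SPEC =====
-- Pre_ is only the set-representation invariant of the type convention: the four Python
-- arguments ARE sets, so their list encodings hold distinct elements; no Python input is excluded.
def Pre_topology_diff_py (old_edges : List (String × String × String)) (new_edges : List (String × String × String)) (old_classes : List String) (new_classes : List String) : Prop :=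
  old_edges.Nodup ∧ new_edges.Nodup ∧ old_classes.Nodup ∧ new_classes.Nodup
instance (old_edges : List (String × String × String)) (new_edges : List (String × String × String)) (old_classes : List String) (new_classes : List String) : Decidable (Pre_topology_diff_py old_edges new_edges old_classes new_classes) := by unfold Pre_topology_diff_py; infer_instance

def pvWitness_topology_diff_py : (List (String × String × String)) × (List (String × String × String)) × List String × List String :=
  ([("A", "p", "B")], [("A", "p", "B"), ("A", "q", "C")], ["A", "B"], ["B", "C"])

def Spec_topology_diff_py (old_edges : List (String × String × String)) (new_edges : List (String × String × String)) (old_classes : List String) (new_classes : List String) (out : List (String × List (List (String × String)))) : Prop := out = topology_diff_py_alt old_edges new_edges old_classes new_classes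
instance (old_edges : List (String × String × String)) (new_edges : List (String × String × String)) (old_classes : List String) (new_classes : List String) (out : List (String × List (List (String × String)))) : Decidable (Spec_topology_diff_py old_edges new_edges old_classes new_classes out) := by unfold Spec_topology_diff_py; infer_instance

-- ===== CLAIM (what is proved, stated in full; the proofs are below) =====
def Claim_equal_topology_diff_py : Prop := ∀ (old_edges : List (String × String × String)) (new_edges : List (String × String × String)) (old_classes : List String) (new_classes : List String), Dom_topology_diff_py old_edges new_edges old_classes new_classes → Pre_topology_diff_py old_edges new_edges old_classes new_classes → Spec_topology_diff_py old_edges new_edges old_classes new_classes (topology_diff_py old_edges new_edges old_classes new_classes)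

-- ===== LEMMAS AND PROOFS =====

-- s | t as a list: s followed by the elements of t not already in s (t without duplicates)
theorem pv_union_eq {α : Type} [BEq α] [LawfulBEq α] (s t : List α) (ht : t.Nodup) :
    PySem.Set.union s t = s ++ t.filter (fun x => !PySem.Set.contains s x) := by
  induction t generalizing s with
  | nil => simp [PySem.Set.union, PySem.Set.update]
  | cons x t ih =>
    obtain ⟨hx, ht'⟩ := List.nodup_cons.mp ht
    have hstep : PySem.Set.union s (x :: t) = PySem.Set.union (PySem.Set.add s x) t := rfl
    by_cases hmem : x ∈ s
    · have hadd : PySem.Set.add s x = s := by simp [PySem.Set.add, hmem]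
      rw [hstep, hadd, ih s ht']
      simp [hmem]
    · have hadd : PySem.Set.add s x = s ++ [x] := by simp [PySem.Set.add, hmem]
      rw [hstep, hadd, ih _ ht']
      have hfc : t.filter (fun y => !PySem.Set.contains (s ++ [x]) y)
          = t.filter (fun y => !PySem.Set.contains s y) := by
        apply List.filter_congr
        intro y hy
        have hyx : y ≠ x := fun h => hx (h ▸ hy)
        simp [PySem.Set.contains, hyx]
      rw [hfc]
      simp [hmem, List.append_assoc]

-- the common/added/removed set algebra mapped to dicts and key-sorted (B) equals
-- A's "sort the union by k, branch per element" construction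
theorem pv_combine {α κ β : Type} [BEq α] [LawfulBEq α] [LinearOrder κ]
    (old new : List α) (ho : old.Nodup) (hn : new.Nodup)
    (f gC gA gR : α → β) (k : α → κ) (key : β → κ)
    (hinj : Function.Injective k)
    (hkey : ∀ x, key (f x) = k x)
    (hC : ∀ x, x ∈ old → x ∈ new → gC x = f x)
    (hA : ∀ x, x ∈ new → x ∉ old → gA x = f x)
    (hR : ∀ x, x ∈ old → x ∉ new → gR x = f x) :
    PySem.List.sorted
      ((PySem.Set.inter old new).map gC ++ (PySem.Set.diff new old).map gA ++ (PySem.Set.diff old new).map gR) key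
      = (PySem.List.sorted (PySem.Set.union old new) k).map f := by
  apply PySem.List.sorted_eq_of_perm_of_pairwise_lt
  · -- ys.Perm xs
    have h1 : ((PySem.List.sorted (PySem.Set.union old new) k).map f).Perm
        ((PySem.Set.union old new).map f) :=
      (PySem.List.sorted_perm (PySem.Set.union old new) k false).map f
    have h2 : (PySem.Set.union old new).map f
        = old.map f ++ (new.filter (fun x => !PySem.Set.contains old x)).map f := by
      rw [pv_union_eq old new hn, List.map_append]
    have hCmap : (old.filter (fun x => PySem.Set.contains new x)).map f
        = (PySem.Set.inter old new).map gC := by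
      apply List.map_congr_left
      intro x hx
      have hm := List.mem_filter.mp hx
      have hmm : x ∈ new := by simpa using hm.2
      exact (hC x hm.1 hmm).symm
    have hRmap : (old.filter (fun x => !PySem.Set.contains new x)).map f
        = (PySem.Set.diff old new).map gR := by
      apply List.map_congr_left
      intro x hx
      have hm := List.mem_filter.mp hx
      have hnm : x ∉ new := by simpa using hm.2
      exact (hR x hm.1 hnm).symm
    have hAmap : (new.filter (fun x => !PySem.Set.contains old x)).map f
        = (PySem.Set.diff new old).map gA := by
      apply List.map_congr_left
      intro x hx
      have hm := List.mem_filter.mp hx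
      have hnm : x ∉ old := by simpa using hm.2
      exact (hA x hm.1 hnm).symm
    have h3 : (old.map f).Perm
        ((PySem.Set.inter old new).map gC ++ (PySem.Set.diff old new).map gR) := by
      rw [← hCmap, ← hRmap, ← List.map_append]
      exact ((List.filter_append_perm (fun x => PySem.Set.contains new x) old).map f).symm
    refine h1.trans ?_
    rw [h2, hAmap]
    refine (h3.append_right _).trans ?_
    rw [List.append_assoc, List.append_assoc]
    exact List.Perm.append_left _ List.perm_append_comm
  · -- pairwise strictly increasing keys on ys
    have hnd : (PySem.List.sorted (PySem.Set.union old new) k).Nodup :=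
      ((PySem.List.sorted_perm (PySem.Set.union old new) k false).symm).nodup
        (PySem.Set.nodup_union old new ho)
    have hle := PySem.List.sorted_pairwise (PySem.Set.union old new) k
    rw [List.pairwise_map]
    refine (hle.and hnd).imp ?_
    intro a b hab
    rw [hkey, hkey]
    exact lt_of_le_of_ne hab.1 (fun h => hab.2 (hinj h))

-- `sorted` does not depend on WHICH Decidable/LT instances decide the (same) order
theorem pv_sorted_ext {α κ : Type} (L1 L2 : LT κ) (D1 : @DecidableLT κ L1) (D2 : @DecidableLT κ L2)
    (h : ∀ a b : κ, @LT.lt κ L1 a b ↔ @LT.lt κ L2 a b) (xs : List α) (key : α → κ) :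
    @PySem.List.sorted α κ L1 D1 xs key false = @PySem.List.sorted α κ L2 D2 xs key false := by
  show List.foldl (fun acc x => PySem.List.insertBy
      (fun a b => @decide (@LT.lt κ L1 (key a) (key b)) (D1 (key a) (key b))) x acc) [] xs
    = List.foldl (fun acc x => PySem.List.insertBy
      (fun a b => @decide (@LT.lt κ L2 (key a) (key b)) (D2 (key a) (key b))) x acc) [] xs
  have hb : (fun a b => @decide (@LT.lt κ L1 (key a) (key b)) (D1 (key a) (key b)))
      = (fun a b => @decide (@LT.lt κ L2 (key a) (key b)) (D2 (key a) (key b))) :=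
    funext fun a => funext fun b => decide_eq_decide.mpr (h (key a) (key b))
  rw [hb]

theorem pv_main (old_edges : List (String × String × String)) (new_edges : List (String × String × String)) (old_classes : List String) (new_classes : List String)
    (h1 : old_edges.Nodup) (h2 : new_edges.Nodup) (h3 : old_classes.Nodup) (h4 : new_classes.Nodup) :
    topology_diff_py old_edges new_edges old_classes new_classes
      = topology_diff_py_alt old_edges new_edges old_classes new_classes := by
  have hnodes := pv_combine (β := List (String × String)) old_classes new_classes h3 h4
    (fun c => [("name", c), ("status",
      if PySem.Set.contains old_classes c && PySem.Set.contains new_classes c then "common"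
      else if PySem.Set.contains new_classes c then "added" else "removed")])
    (fun c => [("name", c), ("status", "common")])
    (fun c => [("name", c), ("status", "added")])
    (fun c => [("name", c), ("status", "removed")])
    (fun c => c) (fun n => PySem.Dict.getD (PySem.Dict.mk n) "name" "")
    (by intro a b h; exact h)
    (fun x => rfl)
    (fun x hxo hxn => by simp [hxo, hxn])
    (fun x hxn hxo => by simp [hxo, hxn])
    (fun x hxo hxn => by simp [hxo, hxn])
  have hedges := pv_combine (β := List (String × String)) old_edges new_edges h1 h2
    (fun e => [("domain", e.1), ("property", e.2.1), ("range", e.2.2), ("status",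
      if PySem.Set.contains old_edges e && PySem.Set.contains new_edges e then "common"
      else if PySem.Set.contains new_edges e then "added" else "removed")])
    (fun e => [("domain", e.1), ("property", e.2.1), ("range", e.2.2), ("status", "common")])
    (fun e => [("domain", e.1), ("property", e.2.1), ("range", e.2.2), ("status", "added")])
    (fun e => [("domain", e.1), ("property", e.2.1), ("range", e.2.2), ("status", "removed")])
    (fun e => [e.1, e.2.1, e.2.2])
    (fun x => [PySem.Dict.getD (PySem.Dict.mk x) "domain" "", PySem.Dict.getD (PySem.Dict.mk x) "property" "", PySem.Dict.getD (PySem.Dict.mk x) "range" ""])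
    (by
      rintro ⟨a1, a2, a3⟩ ⟨b1, b2, b3⟩ h
      simp only [List.cons.injEq, and_true] at h
      simp [h.1, h.2.1, h.2.2])
    (fun x => rfl)
    (fun x hxo hxn => by simp [hxo, hxn])
    (fun x hxn hxo => by simp [hxo, hxn])
    (fun x hxo hxn => by simp [hxo, hxn])
  unfold topology_diff_py topology_diff_py_alt pvEdgeDicts
  simp only [PySem.List.foldl_append_singleton_eq_map, List.nil_append]
  rw [hnodes]
  refine congrArg (fun z => [("nodes", _), ("edges", z)]) ?_
  exact ((pv_sorted_ext _ _ _ _ (fun a b => Iff.rfl) _ _).trans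
    (hedges.trans (congrArg (List.map _) (pv_sorted_ext _ _ _ _ (fun a b => Iff.rfl) _ _).symm))).symm

-- ===== VERDICT (by name: the statement is the Claim_ definition above) =====
theorem topology_diff_py_spec : Claim_equal_topology_diff_py := by
  intro old_edges new_edges old_classes new_classes _ hPre
  unfold Spec_topology_diff_py
  exact pv_main old_edges new_edges old_classes new_classes hPre.1 hPre.2.1 hPre.2.2.1 hPre.2.2.2
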